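-- pv_equiv track=rewrite | github.com/HenriHyttinen/Ai-assistant | backend/scripts/import_500_correct_recipes.py | determine_cuisine
-- ===== SOURCE A (Python) =====
-- def determine_cuisine(title, categories):
--     """Determine cuisine from title and categories"""
--     title_lower = title.lower()
--     categories_lower = categories.lower() if categories else ""
--
--     # French cuisine keywords
--     if any(word in title_lower for word in ['french', 'coq au vin', 'ratatouille', 'bouillabaisse', 'cassoulet', 'tarte', 'crêpe', 'soufflé', 'confit', 'bourguignon']):
--         return 'French'
--     elif any(word in title_lower for word in ['italian', 'pasta', 'pizza', 'risotto', 'bruschetta', 'tiramisu', 'carbonara', 'parmigiana', 'bolognese']):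
--         return 'Italian'
--     elif any(word in title_lower for word in ['mexican', 'taco', 'burrito', 'enchilada', 'quesadilla', 'guacamole', 'salsa', 'mole', 'pozole']):
--         return 'Mexican'
--     elif any(word in title_lower for word in ['chinese', 'stir-fry', 'lo mein', 'kung pao', 'sweet and sour', 'dim sum', 'wonton', 'dumpling']):
--         return 'Chinese'
--     elif any(word in title_lower for word in ['thai', 'pad thai', 'curry', 'tom yum', 'green curry', 'red curry', 'coconut', 'lemongrass']):
--         return 'Thai'
--     elif any(word in title_lower for word in ['japanese', 'sushi', 'ramen', 'teriyaki', 'miso', 'tempura', 'udon', 'soba']):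
--         return 'Japanese'
--     elif any(word in title_lower for word in ['indian', 'curry', 'tikka', 'masala', 'biryani', 'dal', 'naan', 'tandoori']):
--         return 'Indian'
--     elif any(word in title_lower for word in ['greek', 'gyro', 'tzatziki', 'moussaka', 'baklava', 'feta', 'olive', 'oregano']):
--         return 'Greek'
--     elif any(word in title_lower for word in ['spanish', 'paella', 'tapas', 'gazpacho', 'chorizo', 'sangria', 'sherry']):
--         return 'Spanish'
--     elif any(word in title_lower for word in ['german', 'sauerkraut', 'bratwurst', 'schnitzel', 'pretzel', 'beer']):
--         return 'German'
--     elif any(word in title_lower for word in ['american', 'burger', 'barbecue', 'bbq', 'mac and cheese', 'apple pie', 'cobbler']):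
--         return 'American'
--     elif any(word in title_lower for word in ['mediterranean', 'olive', 'hummus', 'falafel', 'tabbouleh', 'pita']):
--         return 'Mediterranean'
--     else:
--         return 'International'
-- ===== SOURCE B (Python) =====
-- CUISINE_NAMES = ['French', 'Italian', 'Mexican', 'Chinese', 'Thai', 'Japanese', 'Indian', 'Greek', 'Spanish', 'German', 'American', 'Mediterranean']
--
-- # (keyword, priority-rank) pairs, flattened in A's priority order
-- KEYWORDS = [
--     ('french', 0),
--     ('coq au vin', 0),
--     ('ratatouille', 0),
--     ('bouillabaisse', 0),
--     ('cassoulet', 0),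
--     ('tarte', 0),
--     ('crêpe', 0),
--     ('soufflé', 0),
--     ('confit', 0),
--     ('bourguignon', 0),
--     ('italian', 1),
--     ('pasta', 1),
--     ('pizza', 1),
--     ('risotto', 1),
--     ('bruschetta', 1),
--     ('tiramisu', 1),
--     ('carbonara', 1),
--     ('parmigiana', 1),
--     ('bolognese', 1),
--     ('mexican', 2),
--     ('taco', 2),
--     ('burrito', 2),
--     ('enchilada', 2),
--     ('quesadilla', 2),
--     ('guacamole', 2),
--     ('salsa', 2),
--     ('mole', 2),
--     ('pozole', 2),
--     ('chinese', 3),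
--     ('stir-fry', 3),
--     ('lo mein', 3),
--     ('kung pao', 3),
--     ('sweet and sour', 3),
--     ('dim sum', 3),
--     ('wonton', 3),
--     ('dumpling', 3),
--     ('thai', 4),
--     ('pad thai', 4),
--     ('curry', 4),
--     ('tom yum', 4),
--     ('green curry', 4),
--     ('red curry', 4),
--     ('coconut', 4),
--     ('lemongrass', 4),
--     ('japanese', 5),
--     ('sushi', 5),
--     ('ramen', 5),
--     ('teriyaki', 5),
--     ('miso', 5),
--     ('tempura', 5),
--     ('udon', 5),
--     ('soba', 5),
--     ('indian', 6),
--     ('curry', 6),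
--     ('tikka', 6),
--     ('masala', 6),
--     ('biryani', 6),
--     ('dal', 6),
--     ('naan', 6),
--     ('tandoori', 6),
--     ('greek', 7),
--     ('gyro', 7),
--     ('tzatziki', 7),
--     ('moussaka', 7),
--     ('baklava', 7),
--     ('feta', 7),
--     ('olive', 7),
--     ('oregano', 7),
--     ('spanish', 8),
--     ('paella', 8),
--     ('tapas', 8),
--     ('gazpacho', 8),
--     ('chorizo', 8),
--     ('sangria', 8),
--     ('sherry', 8),
--     ('german', 9),
--     ('sauerkraut', 9),
--     ('bratwurst', 9),
--     ('schnitzel', 9),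
--     ('pretzel', 9),
--     ('beer', 9),
--     ('american', 10),
--     ('burger', 10),
--     ('barbecue', 10),
--     ('bbq', 10),
--     ('mac and cheese', 10),
--     ('apple pie', 10),
--     ('cobbler', 10),
--     ('mediterranean', 11),
--     ('olive', 11),
--     ('hummus', 11),
--     ('falafel', 11),
--     ('tabbouleh', 11),
--     ('pita', 11),
-- ]
--
-- def determine_cuisine(title, categories):
--     """Determine cuisine from title and categories"""
--     title_lower = title.lower()
--     categories_lower = categories.lower() if categories else ""
--     best = min((rank for word, rank in KEYWORDS if word in title_lower), default=None)
--     return 'International' if best is None else CUISINE_NAMES[best]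
-- ===== Notes on version B (the rewrite author's own statement) =====
-- stated objective: alternative
-- what changed: Instead of A's priority-ordered if/elif chain that stops at the first matching cuisine, B flattens all keywords into one (keyword, rank) table, collects the ranks of every matching keyword in a single generator, and aggregates with min() to pick the highest-priority cuisine, indexing into CUISINE_NAMES.
import Mathlib
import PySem

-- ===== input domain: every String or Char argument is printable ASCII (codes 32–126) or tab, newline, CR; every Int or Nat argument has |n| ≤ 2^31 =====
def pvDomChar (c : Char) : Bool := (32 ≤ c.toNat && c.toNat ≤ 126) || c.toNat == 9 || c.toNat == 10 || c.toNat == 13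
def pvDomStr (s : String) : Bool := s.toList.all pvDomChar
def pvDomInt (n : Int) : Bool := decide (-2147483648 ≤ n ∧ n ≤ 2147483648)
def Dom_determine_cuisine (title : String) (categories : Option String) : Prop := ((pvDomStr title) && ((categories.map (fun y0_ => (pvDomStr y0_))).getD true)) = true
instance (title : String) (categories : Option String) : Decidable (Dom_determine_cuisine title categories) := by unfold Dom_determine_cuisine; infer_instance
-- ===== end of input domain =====

-- B replaces A's priority if/elif chain by a min-rank aggregation over one flat (keyword, rank) table (alternative decomposition; same cost).


-- ===== PORT A =====
def determine_cuisine (title : String) (categories : Option String) : String :=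
  let title_lower := PySem.Str.lower title
  let _categories_lower := match categories with
    | some c => if c ≠ "" then PySem.Str.lower c else ""
    | none => ""
  if (["french", "coq au vin", "ratatouille", "bouillabaisse", "cassoulet", "tarte", "crêpe", "soufflé", "confit", "bourguignon"].any (fun w => PySem.Str.isIn w title_lower)) then "French"
  else if (["italian", "pasta", "pizza", "risotto", "bruschetta", "tiramisu", "carbonara", "parmigiana", "bolognese"].any (fun w => PySem.Str.isIn w title_lower)) then "Italian"
  else if (["mexican", "taco", "burrito", "enchilada", "quesadilla", "guacamole", "salsa", "mole", "pozole"].any (fun w => PySem.Str.isIn w title_lower)) then "Mexican"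
  else if (["chinese", "stir-fry", "lo mein", "kung pao", "sweet and sour", "dim sum", "wonton", "dumpling"].any (fun w => PySem.Str.isIn w title_lower)) then "Chinese"
  else if (["thai", "pad thai", "curry", "tom yum", "green curry", "red curry", "coconut", "lemongrass"].any (fun w => PySem.Str.isIn w title_lower)) then "Thai"
  else if (["japanese", "sushi", "ramen", "teriyaki", "miso", "tempura", "udon", "soba"].any (fun w => PySem.Str.isIn w title_lower)) then "Japanese"
  else if (["indian", "curry", "tikka", "masala", "biryani", "dal", "naan", "tandoori"].any (fun w => PySem.Str.isIn w title_lower)) then "Indian"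
  else if (["greek", "gyro", "tzatziki", "moussaka", "baklava", "feta", "olive", "oregano"].any (fun w => PySem.Str.isIn w title_lower)) then "Greek"
  else if (["spanish", "paella", "tapas", "gazpacho", "chorizo", "sangria", "sherry"].any (fun w => PySem.Str.isIn w title_lower)) then "Spanish"
  else if (["german", "sauerkraut", "bratwurst", "schnitzel", "pretzel", "beer"].any (fun w => PySem.Str.isIn w title_lower)) then "German"
  else if (["american", "burger", "barbecue", "bbq", "mac and cheese", "apple pie", "cobbler"].any (fun w => PySem.Str.isIn w title_lower)) then "American"
  else if (["mediterranean", "olive", "hummus", "falafel", "tabbouleh", "pita"].any (fun w => PySem.Str.isIn w title_lower)) then "Mediterranean"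
  else "International"

-- ===== PORT B =====
def pvNames : List String := ["French", "Italian", "Mexican", "Chinese", "Thai", "Japanese", "Indian", "Greek", "Spanish", "German", "American", "Mediterranean"]

-- (keyword, priority-rank) pairs, flattened in A's priority order (Source B's KEYWORDS)
def pvKeywords : List (String × Nat) := [
  ("french", 0),
  ("coq au vin", 0),
  ("ratatouille", 0),
  ("bouillabaisse", 0),
  ("cassoulet", 0),
  ("tarte", 0),
  ("crêpe", 0),
  ("soufflé", 0),
  ("confit", 0),
  ("bourguignon", 0),
  ("italian", 1),
  ("pasta", 1),
  ("pizza", 1),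
  ("risotto", 1),
  ("bruschetta", 1),
  ("tiramisu", 1),
  ("carbonara", 1),
  ("parmigiana", 1),
  ("bolognese", 1),
  ("mexican", 2),
  ("taco", 2),
  ("burrito", 2),
  ("enchilada", 2),
  ("quesadilla", 2),
  ("guacamole", 2),
  ("salsa", 2),
  ("mole", 2),
  ("pozole", 2),
  ("chinese", 3),
  ("stir-fry", 3),
  ("lo mein", 3),
  ("kung pao", 3),
  ("sweet and sour", 3),
  ("dim sum", 3),
  ("wonton", 3),
  ("dumpling", 3),
  ("thai", 4),
  ("pad thai", 4),
  ("curry", 4),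
  ("tom yum", 4),
  ("green curry", 4),
  ("red curry", 4),
  ("coconut", 4),
  ("lemongrass", 4),
  ("japanese", 5),
  ("sushi", 5),
  ("ramen", 5),
  ("teriyaki", 5),
  ("miso", 5),
  ("tempura", 5),
  ("udon", 5),
  ("soba", 5),
  ("indian", 6),
  ("curry", 6),
  ("tikka", 6),
  ("masala", 6),
  ("biryani", 6),
  ("dal", 6),
  ("naan", 6),
  ("tandoori", 6),
  ("greek", 7),
  ("gyro", 7),
  ("tzatziki", 7),
  ("moussaka", 7),
  ("baklava", 7),
  ("feta", 7),
  ("olive", 7),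
  ("oregano", 7),
  ("spanish", 8),
  ("paella", 8),
  ("tapas", 8),
  ("gazpacho", 8),
  ("chorizo", 8),
  ("sangria", 8),
  ("sherry", 8),
  ("german", 9),
  ("sauerkraut", 9),
  ("bratwurst", 9),
  ("schnitzel", 9),
  ("pretzel", 9),
  ("beer", 9),
  ("american", 10),
  ("burger", 10),
  ("barbecue", 10),
  ("bbq", 10),
  ("mac and cheese", 10),
  ("apple pie", 10),
  ("cobbler", 10),
  ("mediterranean", 11),
  ("olive", 11),
  ("hummus", 11),
  ("falafel", 11),
  ("tabbouleh", 11),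
  ("pita", 11)]

def determine_cuisine_alt (title : String) (categories : Option String) : String :=
  let title_lower := PySem.Str.lower title
  let _categories_lower := match categories with
    | some c => if c ≠ "" then PySem.Str.lower c else ""
    | none => ""
  -- min((rank for word, rank in KEYWORDS if word in title_lower), default=None)
  let ms : List Nat := pvKeywords.filterMap (fun p => if PySem.Str.isIn p.1 title_lower then some p.2 else none)
  match PySem.List.min? ms (fun r => r) with
  | none => "International"
  | some r =>
      -- CUISINE_NAMES[best]; .getD is exact here: every rank is < 12 = len(CUISINE_NAMES), so no IndexError
      (PySem.List.pyGet? pvNames (r : Int)).getD "International"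

-- ===== PRECONDITION & SPEC =====
def Spec_determine_cuisine (title : String) (categories : Option String) (out : String) : Prop := out = determine_cuisine_alt title categories
instance (title : String) (categories : Option String) (out : String) : Decidable (Spec_determine_cuisine title categories out) := by unfold Spec_determine_cuisine; infer_instance

-- ===== CLAIM (what is proved, stated in full; the proofs are below) =====
def Claim_equal_determine_cuisine : Prop := ∀ (title : String) (categories : Option String), Dom_determine_cuisine title categories → Spec_determine_cuisine title categories (determine_cuisine title categories)

-- ===== LEMMAS AND PROOFS =====

-- A's table, for the proof: the 12 cuisines with their keyword lists in priority order
def pvCuisines : List (String × List String) := [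
  ("French", ["french", "coq au vin", "ratatouille", "bouillabaisse", "cassoulet", "tarte", "crêpe", "soufflé", "confit", "bourguignon"]),
  ("Italian", ["italian", "pasta", "pizza", "risotto", "bruschetta", "tiramisu", "carbonara", "parmigiana", "bolognese"]),
  ("Mexican", ["mexican", "taco", "burrito", "enchilada", "quesadilla", "guacamole", "salsa", "mole", "pozole"]),
  ("Chinese", ["chinese", "stir-fry", "lo mein", "kung pao", "sweet and sour", "dim sum", "wonton", "dumpling"]),
  ("Thai", ["thai", "pad thai", "curry", "tom yum", "green curry", "red curry", "coconut", "lemongrass"]),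
  ("Japanese", ["japanese", "sushi", "ramen", "teriyaki", "miso", "tempura", "udon", "soba"]),
  ("Indian", ["indian", "curry", "tikka", "masala", "biryani", "dal", "naan", "tandoori"]),
  ("Greek", ["greek", "gyro", "tzatziki", "moussaka", "baklava", "feta", "olive", "oregano"]),
  ("Spanish", ["spanish", "paella", "tapas", "gazpacho", "chorizo", "sangria", "sherry"]),
  ("German", ["german", "sauerkraut", "bratwurst", "schnitzel", "pretzel", "beer"]),
  ("American", ["american", "burger", "barbecue", "bbq", "mac and cheese", "apple pie", "cobbler"]),
  ("Mediterranean", ["mediterranean", "olive", "hummus", "falafel", "tabbouleh", "pita"])]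

-- first index ("rank") in the table whose keyword list has a match in tl
def pvFirstHit (tl : String) : List (String × List String) → Option Nat
  | [] => none
  | (_, ws) :: rest =>
      if ws.any (fun w => PySem.Str.isIn w tl) then some 0
      else (pvFirstHit tl rest).map (· + 1)

-- A's chain as a recursion over the table
def pvPickName (tl : String) : List (String × List String) → String
  | [] => "International"
  | (name, ws) :: rest =>
      if ws.any (fun w => PySem.Str.isIn w tl) then name else pvPickName tl rest

-- flatten a table into (keyword, rank) pairs starting at rank k
def pvFlatten : List (String × List String) → Nat → List (String × Nat)
  | [], _ => []
  | (_, ws) :: rest, k => ws.map (fun w => (w, k)) ++ pvFlatten rest (k + 1)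

theorem pvKeywords_eq_flatten : pvKeywords = pvFlatten pvCuisines 0 := by rfl

theorem pvNames_eq_map : pvNames = pvCuisines.map Prod.fst := by rfl

theorem pick_unfold (title : String) (categories : Option String) :
    determine_cuisine title categories = pvPickName (PySem.Str.lower title) pvCuisines := by
  simp only [determine_cuisine, pvPickName, pvCuisines]

theorem pickName_eq_firstHit (tl : String) (L : List (String × List String)) :
    pvPickName tl L =
      match pvFirstHit tl L with
      | none => "International"
      | some i => ((L[i]?).map Prod.fst).getD "International" := by
  induction L with
  | nil => rfl
  | cons hd rest ih =>
      obtain ⟨name, ws⟩ := hd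
      by_cases h : (ws.any (fun w => PySem.Str.isIn w tl)) = true
      · simp only [pvPickName, pvFirstHit, if_pos h]
        rfl
      · simp only [pvPickName, pvFirstHit, if_neg h]
        rw [ih]
        cases pvFirstHit tl rest with
        | none => rfl
        | some i => simp

-- every rank occurring in the filtered flatten starting at k is ≥ k
theorem flatten_rank_ge (tl : String) (L : List (String × List String)) (k : Nat) :
    ∀ r ∈ (pvFlatten L k).filterMap (fun p => if PySem.Str.isIn p.1 tl then some p.2 else none), k ≤ r := by
  induction L generalizing k with
  | nil => intro r hr; simp [pvFlatten] at hr
  | cons hd rest ih =>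
      obtain ⟨name, ws⟩ := hd
      intro r hr
      simp only [pvFlatten, List.filterMap_append, List.mem_append] at hr
      rcases hr with hr | hr
      · rw [List.filterMap_map] at hr
        obtain ⟨w, _, hw⟩ := List.mem_filterMap.mp hr
        simp only [Function.comp] at hw
        split at hw
        · exact Nat.le_of_eq (Option.some_inj.mp hw)
        · exact absurd hw (by simp)
      · exact Nat.le_of_succ_le (ih (k + 1) r hr)

-- min over the filtered flatten = first hit rank (shifted by the start rank k)
theorem min_flatten_eq_firstHit (tl : String) (L : List (String × List String)) (k : Nat) :
    PySem.List.min? ((pvFlatten L k).filterMap (fun p => if PySem.Str.isIn p.1 tl then some p.2 else none)) (fun r => r)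
      = (pvFirstHit tl L).map (· + k) := by
  induction L generalizing k with
  | nil => rfl
  | cons hd rest ih =>
      obtain ⟨name, ws⟩ := hd
      simp only [pvFlatten, pvFirstHit, List.filterMap_append]
      by_cases h : (ws.any (fun w => PySem.Str.isIn w tl)) = true
      · -- some keyword of the head cuisine matches: the min is k
        rw [if_pos h]
        have hmem : k ∈ (ws.map (fun w => (w, k))).filterMap (fun p => if PySem.Str.isIn p.1 tl then some p.2 else none)
              ++ (pvFlatten rest (k + 1)).filterMap (fun p => if PySem.Str.isIn p.1 tl then some p.2 else none) := by
          obtain ⟨w, hwmem, hwin⟩ := List.any_eq_true.mp h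
          have hwin' : PySem.Chars.isIn w.toList tl.toList = true := by simpa using hwin
          refine List.mem_append.mpr (Or.inl ?_)
          rw [List.filterMap_map]
          exact List.mem_filterMap.mpr ⟨w, hwmem, by simp [Function.comp, hwin']⟩
        have hlb : ∀ x ∈ (ws.map (fun w => (w, k))).filterMap (fun p => if PySem.Str.isIn p.1 tl then some p.2 else none)
              ++ (pvFlatten rest (k + 1)).filterMap (fun p => if PySem.Str.isIn p.1 tl then some p.2 else none), k ≤ x := by
          intro x hx
          rcases List.mem_append.mp hx with hx | hx
          · rw [List.filterMap_map] at hx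
            obtain ⟨w, _, hw⟩ := List.mem_filterMap.mp hx
            simp only [Function.comp] at hw
            split at hw
            · exact Nat.le_of_eq (Option.some_inj.mp hw)
            · exact absurd hw (by simp)
          · exact Nat.le_of_succ_le (flatten_rank_ge tl rest (k + 1) x hx)
        cases hm : PySem.List.min? ((ws.map (fun w => (w, k))).filterMap (fun p => if PySem.Str.isIn p.1 tl then some p.2 else none)
              ++ (pvFlatten rest (k + 1)).filterMap (fun p => if PySem.Str.isIn p.1 tl then some p.2 else none)) (fun r => r) with
        | none =>
            rw [(PySem.List.min?_eq_none_iff _ _).mp hm] at hmem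
            exact absurd hmem (by simp)
        | some m =>
            have h1 : m ≤ k := PySem.List.min?_isMin hm k hmem
            have h2 : k ≤ m := hlb m (PySem.List.min?_mem hm)
            have : m = k := Nat.le_antisymm h1 h2
            subst this
            simp
      · -- no keyword of the head cuisine matches: the head contributes nothing
        have hnil : (ws.map (fun w => (w, k))).filterMap (fun p => if PySem.Str.isIn p.1 tl then some p.2 else none) = [] := by
          rw [List.filterMap_eq_nil_iff]
          intro p hp
          obtain ⟨w, hwmem, rfl⟩ := List.mem_map.mp hp
          have hf : PySem.Chars.isIn w.toList tl.toList = false := by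
            rw [Bool.eq_false_iff]
            intro hc
            exact h (List.any_eq_true.mpr ⟨w, hwmem, by simpa using hc⟩)
          simp [hf]
        rw [if_neg h, hnil, List.nil_append, ih (k + 1)]
        cases pvFirstHit tl rest with
        | none => rfl
        | some i => simp only [Option.map_some]; congr 1; omega

-- ===== VERDICT (by name: the statement is the Claim_ definition above) =====
theorem determine_cuisine_spec : Claim_equal_determine_cuisine := by
  intro title categories _
  show determine_cuisine title categories = determine_cuisine_alt title categories
  rw [pick_unfold, pickName_eq_firstHit]
  show _ = match PySem.List.min? (pvKeywords.filterMap (fun p => if PySem.Str.isIn p.1 (PySem.Str.lower title) then some p.2 else none)) (fun r => r) with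
    | none => "International"
    | some r => (PySem.List.pyGet? pvNames (r : Int)).getD "International"
  rw [pvKeywords_eq_flatten, min_flatten_eq_firstHit]
  cases hf : pvFirstHit (PySem.Str.lower title) pvCuisines with
  | none => rfl
  | some i =>
      simp only [Option.map_some, Nat.add_zero, PySem.List.pyGet?_natCast, pvNames_eq_map,
        List.getElem?_map]
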